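-- pv_equiv track=rewrite | github.com/WiiXLinux/Einfuerung-in-die-Algorithmik-SS23-CAU-Kiel | HA7/A7.2.py | bin_inc_mut_helper
-- ===== SOURCE A (Python) =====
-- def bin_inc_mut_helper(n):
--     """
--     Mutative incrementation of a binary number in list format.
--     Will count steps it needed to compute.
--     Comparisons have been ignored for simplicity.
--     """
--     steps = 0
--     i = 0
--     steps += 1
--     while i < len(n) and n[i] == 1:
--         n[i] = 0
--         i = i + 1
--         steps += 2
--     if i == len(n):
--         n.append(1)
--     else:
--         n[i] = 1
--     steps += 1
--     return steps
-- ===== SOURCE B (Python) =====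
-- def bin_inc_mut_helper(n):
--     """
--     Recursive, purely functional increment: build a fresh incremented list
--     by structural recursion (no index arithmetic, no running counter),
--     then copy it back into n; the step count is reconstructed as 2 + 2*i
--     from the number of consumed leading ones.
--     """
--     def inc(rest):
--         # returns (incremented list, number of leading ones consumed)
--         if not rest:
--             return [1], 0
--         if rest[0] == 1:
--             out, i = inc(rest[1:])
--             return [0] + out, i + 1
--         return [1] + rest[1:], 0
--     out, i = inc(n)
--     n[:] = out
--     return 2 + 2 * i
-- ===== Notes on version B (the rewrite author's own statement) =====
-- stated objective: alternative
-- what changed: B replaces A's index-based mutating while loop with a purely functional structural recursion that builds a fresh incremented list (counting the consumed leading ones on the way back up), copies it into n, and reconstructs the step count as 2 + 2*i.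
import Mathlib
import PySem

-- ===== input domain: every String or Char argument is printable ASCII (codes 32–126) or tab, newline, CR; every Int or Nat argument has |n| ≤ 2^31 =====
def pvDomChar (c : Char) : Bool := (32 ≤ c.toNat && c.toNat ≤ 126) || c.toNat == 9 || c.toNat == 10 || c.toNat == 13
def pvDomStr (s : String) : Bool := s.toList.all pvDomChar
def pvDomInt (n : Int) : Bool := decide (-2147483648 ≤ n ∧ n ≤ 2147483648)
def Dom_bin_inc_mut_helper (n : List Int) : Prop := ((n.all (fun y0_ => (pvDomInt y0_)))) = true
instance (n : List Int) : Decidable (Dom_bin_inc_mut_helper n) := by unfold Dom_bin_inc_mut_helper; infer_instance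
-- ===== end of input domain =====

-- B replaces A's index-based mutating while loop (with its running step counter) by a
-- purely functional structural recursion building a fresh incremented list, copying it
-- back and reconstructing the count as 2 + 2*i (objective: alternative).
-- Both A and B leave the argument list mutated identically in Python; the equivalence
-- proved here is about the RETURN value (the step count).


-- ===== PORT A =====
-- A's while loop: walks i forward while n[i]==1, adding 2 to steps each iteration;
-- the trailing 'steps += 1' is folded into the exit branch.
def binIncLoopA (n : List Int) (i : Nat) (steps : Int) : Int :=
  if h : i < n.length ∧ n[i]! = 1 then binIncLoopA n (i + 1) (steps + 2)
  else steps + 1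
termination_by n.length - i
decreasing_by omega

def bin_inc_mut_helper (n : List Int) : Int :=
  binIncLoopA n 0 1   -- steps = 0; steps += 1 before the loop

-- ===== PORT B =====
-- B's recursive helper inc: returns the incremented list and the number of
-- leading ones consumed (the list component models the mutation of n).
def binIncRecB : List Int → List Int × Nat
  | [] => ([1], 0)
  | x :: rest =>
    if x = 1 then
      let p := binIncRecB rest
      (0 :: p.1, p.2 + 1)
    else (1 :: rest, 0)

def bin_inc_mut_helper_alt (n : List Int) : Int :=
  2 + 2 * ((binIncRecB n).2 : Int)

-- ===== PRECONDITION & SPEC =====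
def Spec_bin_inc_mut_helper (n : List Int) (out : Int) : Prop := out = bin_inc_mut_helper_alt n
instance (n : List Int) (out : Int) : Decidable (Spec_bin_inc_mut_helper n out) := by unfold Spec_bin_inc_mut_helper; infer_instance

-- ===== CLAIM (what is proved, stated in full; the proofs are below) =====
def Claim_equal_bin_inc_mut_helper : Prop := ∀ (n : List Int), Dom_bin_inc_mut_helper n → Spec_bin_inc_mut_helper n (bin_inc_mut_helper n)

-- ===== LEMMAS AND PROOFS =====
-- Loop invariant: A's counter loop at index i equals the closed form built from
-- B's recursion applied to the remaining suffix n.drop i.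
theorem binIncLoopA_eq_rec (n : List Int) (i : Nat) (steps : Int) :
    binIncLoopA n i steps = steps + 1 + 2 * ((binIncRecB (n.drop i)).2 : Int) := by
  fun_induction binIncLoopA n i steps with
  | case1 i steps h ih =>
      have hd : n.drop i = n[i]! :: n.drop (i + 1) := by
        rw [getElem!_pos n i h.1]
        exact List.drop_eq_getElem_cons h.1
      rw [ih, hd, binIncRecB, if_pos h.2]
      push_cast
      ring
  | case2 i steps h =>
      by_cases hi : i < n.length
      · have h1 : ¬ n[i]! = 1 := fun he => h ⟨hi, he⟩
        have hd : n.drop i = n[i]! :: n.drop (i + 1) := by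
          rw [getElem!_pos n i hi]
          exact List.drop_eq_getElem_cons hi
        rw [hd, binIncRecB, if_neg h1]
        push_cast; ring
      · rw [List.drop_eq_nil_of_le (by omega), binIncRecB]
        push_cast; ring

-- ===== VERDICT (by name: the statement is the Claim_ definition above) =====
theorem bin_inc_mut_helper_spec : Claim_equal_bin_inc_mut_helper := by
  intro n _
  unfold Spec_bin_inc_mut_helper bin_inc_mut_helper bin_inc_mut_helper_alt
  rw [binIncLoopA_eq_rec]
  simp
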